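-- pv_equiv track=rewrite | github.com/norphiil/TLS3_M1_IAFA_MPI_TP | ex/primes.py | split_equal
-- ===== SOURCE A (Python) =====
-- def split_equal(x, n) -> list:
--     result = [0]
--     offset = 0
--     if (x < n):
--         return result
--     elif (x % n == 0):
--         for i in range(n):
--             result.append(x // n + offset)
--             offset += x // n
--     else:
--         zp = n - (x % n)
--         pp = x // n
--         for i in range(n):
--             if (i >= zp):
--                 result.append(pp + 1 + offset)
--                 offset += pp + 1
--             else:
--                 result.append(pp + offset)
--                 offset += pp
--
--     return result
-- ===== SOURCE B (Python) =====
-- def split_equal(x, n) -> list: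
--     if x < n:
--         return [0]
--     q, r = divmod(x, n)
--     return [0] + [k * q + max(0, k - (n - r)) for k in range(1, n + 1)]
-- ===== Notes on version B (the rewrite author's own statement) =====
-- stated objective: simpler
-- what changed: Replaces the two running-offset accumulator loops (separate equal-parts and uneven-parts branches) with a single closed-form comprehension giving offset k directly as k*q + max(0, k-(n-r)).
import Mathlib
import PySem

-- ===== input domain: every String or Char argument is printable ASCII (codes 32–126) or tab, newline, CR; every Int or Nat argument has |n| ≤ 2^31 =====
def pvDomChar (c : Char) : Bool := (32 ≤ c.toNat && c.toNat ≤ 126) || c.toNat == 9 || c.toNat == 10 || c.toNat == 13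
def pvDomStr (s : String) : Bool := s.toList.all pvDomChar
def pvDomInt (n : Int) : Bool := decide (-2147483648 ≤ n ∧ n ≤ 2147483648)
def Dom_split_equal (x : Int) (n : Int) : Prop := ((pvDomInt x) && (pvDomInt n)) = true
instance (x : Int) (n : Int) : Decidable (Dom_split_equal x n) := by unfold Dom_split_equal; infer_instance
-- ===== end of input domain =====

-- B replaces A's running-offset accumulator loop with a direct closed-form comprehension
-- (offset k = k*q + max(0, k-(n-r))); objective: simpler, same O(n) cost.

-- ===== PORT A =====
def split_equal (x : Int) (n : Int) : List Int :=
  let result : List Int := [0]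
  let offset : Int := 0
  if x < n then result
  else if PySem.Int.mod x n = 0 then
    let st := (PySem.List.pyRange 0 n 1).foldl
      (fun (st : List Int × Int) _ =>
        (st.1 ++ [PySem.Int.floordiv x n + st.2], st.2 + PySem.Int.floordiv x n))
      (result, offset)
    st.1
  else
    let zp := n - PySem.Int.mod x n
    let pp := PySem.Int.floordiv x n
    let st := (PySem.List.pyRange 0 n 1).foldl
      (fun (st : List Int × Int) i =>
        if i ≥ zp then (st.1 ++ [pp + 1 + st.2], st.2 + (pp + 1))
        else (st.1 ++ [pp + st.2], st.2 + pp))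
      (result, offset)
    st.1

-- ===== PORT B =====
def split_equal_alt (x : Int) (n : Int) : List Int :=
  if x < n then [0]
  else
    let q := PySem.Int.floordiv x n
    let r := PySem.Int.mod x n
    [0] ++ (PySem.List.pyRange 1 (n + 1) 1).map (fun k => k * q + max 0 (k - (n - r)))

-- ===== PRECONDITION & SPEC =====
-- Pre_ excludes exactly n = 0 with x ≥ 0, where Python's `x % n` raises ZeroDivisionError.
def Pre_split_equal (x : Int) (n : Int) : Prop := n ≠ 0 ∨ x < 0
instance (x : Int) (n : Int) : Decidable (Pre_split_equal x n) := by unfold Pre_split_equal; infer_instance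
def pvWitness_split_equal : Int × Int := (7, 3)

def Spec_split_equal (x : Int) (n : Int) (out : List Int) : Prop := out = split_equal_alt x n
instance (x : Int) (n : Int) (out : List Int) : Decidable (Spec_split_equal x n out) := by unfold Spec_split_equal; infer_instance

-- ===== CLAIM (what is proved, stated in full; the proofs are below) =====
def Claim_equal_split_equal : Prop := ∀ (x : Int) (n : Int), Dom_split_equal x n → Pre_split_equal x n → Spec_split_equal x n (split_equal x n)

-- ===== LEMMAS AND PROOFS =====

-- the loop of A's `x % n == 0` branch computes cumulative multiples of pp
theorem loopA_eq (pp : Int) (m : Nat) :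
    ((PySem.List.pyRange 0 (m : Int) 1).foldl
      (fun (st : List Int × Int) _ => (st.1 ++ [pp + st.2], st.2 + pp)) ([0], 0))
    = ((List.range (m + 1)).map (fun (k : Nat) => (k : Int) * pp), (m : Int) * pp) := by
  induction m with
  | zero => simp [PySem.List.pyRange_one_eq_nil, List.range_succ]
  | succ m ih =>
    have hc1 : ((m + 1 : Nat) : Int) = (m : Int) + 1 := by push_cast; ring
    have h : PySem.List.pyRange 0 ((m : Int) + 1) 1
        = PySem.List.pyRange 0 (m : Int) 1 ++ [(m : Int)] :=
      PySem.List.pyRange_one_succ_right (by positivity)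
    rw [hc1, h, List.foldl_append, ih]
    simp only [List.foldl_cons, List.foldl_nil, Prod.mk.injEq]
    constructor
    · rw [List.range_succ (n := m + 1), List.map_append]
      simp only [List.map_cons, List.map_nil]
      congr 2
      push_cast; ring
    · ring

-- the loop of A's general branch computes offsets k*pp + max 0 (k - zp)
theorem loopB_eq (zp pp : Int) (hzp : 0 ≤ zp) (m : Nat) :
    ((PySem.List.pyRange 0 (m : Int) 1).foldl
      (fun (st : List Int × Int) i =>
        if i ≥ zp then (st.1 ++ [pp + 1 + st.2], st.2 + (pp + 1))
        else (st.1 ++ [pp + st.2], st.2 + pp)) ([0], 0))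
    = ((List.range (m + 1)).map (fun (k : Nat) => (k : Int) * pp + max 0 ((k : Int) - zp)),
       (m : Int) * pp + max 0 ((m : Int) - zp)) := by
  induction m with
  | zero =>
    simp [PySem.List.pyRange_one_eq_nil, List.range_succ]
    omega
  | succ m ih =>
    have hc1 : ((m + 1 : Nat) : Int) = (m : Int) + 1 := by push_cast; ring
    have h : PySem.List.pyRange 0 ((m : Int) + 1) 1
        = PySem.List.pyRange 0 (m : Int) 1 ++ [(m : Int)] :=
      PySem.List.pyRange_one_succ_right (by positivity)
    rw [hc1, h, List.foldl_append, ih]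
    simp only [List.foldl_cons, List.foldl_nil]
    by_cases hc : (m : Int) ≥ zp
    · rw [if_pos hc]
      have h1 : max 0 ((m : Int) - zp) = (m : Int) - zp := by omega
      have h2 : max 0 ((m : Int) + 1 - zp) = (m : Int) + 1 - zp := by omega
      simp only [Prod.mk.injEq]
      constructor
      · rw [List.range_succ (n := m + 1), List.map_append]
        simp only [List.map_cons, List.map_nil]
        congr 2
        push_cast
        rw [h1, h2]; ring
      · rw [h1, h2]; ring
    · rw [if_neg hc]
      have h1 : max 0 ((m : Int) - zp) = 0 := by omega
      have h2 : max 0 ((m : Int) + 1 - zp) = 0 := by omega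
      simp only [Prod.mk.injEq]
      constructor
      · rw [List.range_succ (n := m + 1), List.map_append]
        simp only [List.map_cons, List.map_nil]
        congr 2
        push_cast
        rw [h1, h2]; ring
      · rw [h1, h2]; ring

-- B's list rewritten as a map over List.range
theorem alt_eq_range (x n : Int) (hxn : ¬ x < n) (hn : 0 < n)
    (hzp : 0 ≤ n - PySem.Int.mod x n) :
    split_equal_alt x n
    = (List.range (n.toNat + 1)).map
        (fun (k : Nat) => (k : Int) * PySem.Int.floordiv x n
          + max 0 ((k : Int) - (n - PySem.Int.mod x n))) := by
  unfold split_equal_alt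
  rw [if_neg hxn]
  simp only []
  have hr : PySem.List.pyRange 1 (n + 1) 1
      = (List.range n.toNat).map (fun (k : Nat) => 1 + (k : Int)) := by
    have h1 : (n + 1 - 1).toNat = n.toNat := by omega
    rw [PySem.List.pyRange_one, h1]
  rw [hr, List.range_succ_eq_map]
  simp only [List.map_map, List.map_cons, List.singleton_append]
  congr 1
  · simp
    omega
  · apply List.map_congr_left
    intro k _
    simp only [Function.comp]
    push_cast
    rw [show (1 : Int) + (k : Int) = (k : Int) + 1 from by ring]

-- ===== VERDICT (by name: the statement is the Claim_ definition above) =====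
theorem split_equal_spec : Claim_equal_split_equal := by
  intro x n _ hpre
  unfold Spec_split_equal
  by_cases hxn : x < n
  · unfold split_equal split_equal_alt
    simp [hxn]
  · by_cases hn : 0 < n
    · have hmod : PySem.Int.mod x n = x % n := PySem.Int.mod_eq_emod_of_pos hn
      have hmb : 0 ≤ x % n ∧ x % n < n := ⟨Int.emod_nonneg x (by omega), Int.emod_lt_of_pos x hn⟩
      have hnn : ((n.toNat : Int)) = n := by omega
      have hzp : 0 ≤ n - PySem.Int.mod x n := by omega
      by_cases hz : PySem.Int.mod x n = 0
      · unfold split_equal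
        rw [if_neg hxn, if_pos hz]
        simp only []
        have hl := loopA_eq (PySem.Int.floordiv x n) n.toNat
        rw [hnn] at hl
        rw [hl, alt_eq_range x n hxn hn hzp]
        apply List.map_congr_left
        intro k hk
        rw [List.mem_range] at hk
        have hm0 : max 0 ((k : Int) - (n - PySem.Int.mod x n)) = 0 := by
          rw [hz]; omega
        rw [hm0]; ring
      · unfold split_equal
        rw [if_neg hxn, if_neg hz]
        simp only []
        have hl := loopB_eq (n - PySem.Int.mod x n) (PySem.Int.floordiv x n) hzp n.toNat
        rw [hnn] at hl
        rw [hl, alt_eq_range x n hxn hn hzp]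
    · -- n ≤ 0 and x ≥ n: both loops are empty, both return [0]
      have hnil : PySem.List.pyRange 0 n 1 = [] := PySem.List.pyRange_one_eq_nil (by omega)
      have hnil2 : PySem.List.pyRange 1 (n + 1) 1 = [] := PySem.List.pyRange_one_eq_nil (by omega)
      unfold split_equal split_equal_alt
      rw [if_neg hxn, if_neg hxn]
      split_ifs <;> simp [hnil, hnil2]
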